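-- pv_equiv track=rewrite | github.com/MatteoFoucher/CodeIUT1 | python/TP1/exo4_Foucher_Matteo.py | Derniere_voyelle
-- ===== SOURCE A (Python) =====
-- def Derniere_voyelle(chaine):
--     """Donne la dernière voyelle de la chaine de caractère donnée
--
--     Args:
--         chaine (str): chaine de caractères
--
--     Returns:
--         _type_: str
--     """
--     cpt_voyelle = 0
--     # au début de chaque tour de boucle
--     # carac vaut un caractère de chaine
--     # voyelle vaut la dernière voyelle rencontré dans chaine
--     # cpt_voyelle vaut le nombre de voyelle rencontrée dans chaine
--     for carac in chaine:
--         if carac in "aeiouy":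
--             voyelle = carac
--             cpt_voyelle+=1
--     if cpt_voyelle != 0:
--         return voyelle
--     else :
--         return None
-- ===== SOURCE B (Python) =====
-- def Derniere_voyelle(chaine):
--     """Donne la derniere voyelle de la chaine: scan from the end, return at first vowel."""
--     for carac in reversed(chaine):
--         if carac in "aeiouy":
--             return carac
--     return None
-- ===== Notes on version B (the rewrite author's own statement) =====
-- stated objective: simpler
-- what changed: B scans the string backwards and returns at the first vowel it meets, instead of A's forward pass over every character maintaining a vowel counter and a running last-vowel variable.
import Mathlib
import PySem

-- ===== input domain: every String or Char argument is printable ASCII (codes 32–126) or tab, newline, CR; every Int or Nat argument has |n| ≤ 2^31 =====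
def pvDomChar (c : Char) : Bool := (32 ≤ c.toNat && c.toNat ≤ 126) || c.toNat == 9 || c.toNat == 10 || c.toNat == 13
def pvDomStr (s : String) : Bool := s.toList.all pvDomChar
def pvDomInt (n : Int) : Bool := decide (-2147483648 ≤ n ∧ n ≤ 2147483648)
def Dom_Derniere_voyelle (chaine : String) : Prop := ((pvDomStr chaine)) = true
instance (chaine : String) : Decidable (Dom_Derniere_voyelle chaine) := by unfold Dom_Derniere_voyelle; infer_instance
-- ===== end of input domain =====

-- ===== PORT A =====
-- A: forward pass over the string keeping a vowel counter and the last vowel seen.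
def pvIsVowel (c : Char) : Bool :=
  c == 'a' || c == 'e' || c == 'i' || c == 'o' || c == 'u' || c == 'y'

def pvStepA (s : Int × Option String) (c : Char) : Int × Option String :=
  if pvIsVowel c then (s.1 + 1, some (String.mk [c])) else s

def Derniere_voyelle (chaine : String) : Option String :=
  let st := chaine.toList.foldl pvStepA ((0 : Int), (none : Option String))
  if st.1 ≠ 0 then st.2 else none

-- ===== PORT B =====
-- B: scan the characters in reverse, return at the first vowel met.
def pvFindVowelRev : List Char → Option String
  | [] => none
  | c :: rest => if pvIsVowel c then some (String.mk [c]) else pvFindVowelRev rest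

def Derniere_voyelle_alt (chaine : String) : Option String :=
  pvFindVowelRev chaine.toList.reverse

-- ===== PRECONDITION & SPEC =====
def Spec_Derniere_voyelle (chaine : String) (out : Option String) : Prop := out = Derniere_voyelle_alt chaine
instance (chaine : String) (out : Option String) : Decidable (Spec_Derniere_voyelle chaine out) := by unfold Spec_Derniere_voyelle; infer_instance

-- ===== CLAIM (what is proved, stated in full; the proofs are below) =====
def Claim_equal_Derniere_voyelle : Prop := ∀ (chaine : String), Dom_Derniere_voyelle chaine → Spec_Derniere_voyelle chaine (Derniere_voyelle chaine)

-- ===== LEMMAS AND PROOFS =====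
theorem pv_fold_invariant (l : List Char) :
    0 ≤ (l.foldl pvStepA ((0 : Int), (none : Option String))).1 ∧
    (if (l.foldl pvStepA ((0 : Int), (none : Option String))).1 = 0 then (none : Option String)
     else (l.foldl pvStepA ((0 : Int), (none : Option String))).2) = pvFindVowelRev l.reverse := by
  induction l using List.reverseRecOn with
  | nil => simp [pvFindVowelRev]
  | append_singleton l c ih =>
    obtain ⟨hnn, heq⟩ := ih
    rw [List.foldl_append, List.reverse_append]
    simp only [List.foldl_cons, List.foldl_nil, List.reverse_singleton, List.singleton_append]
    simp only [pvStepA, pvFindVowelRev] at hnn heq ⊢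
    by_cases hv : pvIsVowel c = true
    · simp only [hv, if_true]
      refine ⟨by omega, ?_⟩
      rw [if_neg (by omega)]
    · simp only [hv]
      exact ⟨hnn, heq⟩

-- ===== VERDICT (by name: the statement is the Claim_ definition above) =====
theorem Derniere_voyelle_spec : Claim_equal_Derniere_voyelle := by
  intro chaine _
  unfold Spec_Derniere_voyelle Derniere_voyelle Derniere_voyelle_alt
  obtain ⟨_, heq⟩ := pv_fold_invariant chaine.toList
  simp only []
  rw [← heq]
  by_cases h : (chaine.toList.foldl pvStepA ((0 : Int), (none : Option String))).1 = 0 <;> simp [h]
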